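-- pv_equiv track=rewrite | github.com/hyomin777/Algorithm | 프로그래머스/0/181851. 전국 대회 선발 고사/전국 대회 선발 고사.py | solution
-- ===== SOURCE A (Python) =====
-- def solution(ranks, attendances):
--     top_three = [(101, 101), (101, 101), (101, 101)]
--
--     for idx, value in enumerate(zip(ranks, attendances)):
--         rank, attendance = value
--         if not attendance:
--             continue
--         if rank < max(top_three)[0]:
--             top_three.remove(max(top_three))
--             top_three.append((rank, idx))
--
--     top_three.sort()
--     return top_three[0][1] * 10000 + top_three[1][1] * 100 + top_three[2][1]
-- ===== SOURCE B (Python) =====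
-- def solution(ranks, attendances):
--     # sort-then-slice: all attending candidates beating the sentinel rank, padded with sentinels
--     cands = sorted((r, i) for i, (r, a) in enumerate(zip(ranks, attendances)) if a and r < 101)
--     top = (cands + [(101, 101)] * 3)[:3]
--     return top[0][1] * 10000 + top[1][1] * 100 + top[2][1]
-- ===== Notes on version B (the rewrite author's own statement) =====
-- stated objective: simpler
-- what changed: A's manual fixed-size-3 top-k maintenance (repeated max/remove scans over a mutable triple) is replaced by one filter of attending candidates with rank below the sentinel, a single sort, sentinel padding, and taking the first three.
import Mathlib
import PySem

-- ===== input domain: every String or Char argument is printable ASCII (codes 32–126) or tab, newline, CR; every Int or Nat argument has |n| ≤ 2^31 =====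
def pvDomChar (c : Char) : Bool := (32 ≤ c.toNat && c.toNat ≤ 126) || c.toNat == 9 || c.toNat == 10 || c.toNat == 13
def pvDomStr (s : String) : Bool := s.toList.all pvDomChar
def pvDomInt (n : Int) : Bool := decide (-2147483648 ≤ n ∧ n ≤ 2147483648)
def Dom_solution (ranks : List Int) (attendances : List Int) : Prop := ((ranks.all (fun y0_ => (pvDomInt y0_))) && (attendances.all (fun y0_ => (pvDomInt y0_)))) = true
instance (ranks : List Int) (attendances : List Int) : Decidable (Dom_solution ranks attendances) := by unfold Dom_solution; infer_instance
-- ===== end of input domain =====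

-- B replaces A's manual 3-element top-k maintenance by filter + sort + sentinel padding + take-3 (simpler, not faster).

-- ===== PORT A =====
-- A-side helper: the body of A's for-loop, one iteration on the running top_three
def pvStepA (top_three : List (Int × Int)) (p : Int × (Int × Int)) : List (Int × Int) :=
  if p.2.2 == 0 then top_three                                   -- 'if not attendance: continue'
  else
    match PySem.List.max2? top_three Prod.fst Prod.snd with      -- max(top_three), Python tuple order
    | none => top_three                                          -- unreachable: top_three always has 3 elements
    | some m =>
      if p.2.1 < m.1 then
        match PySem.List.remove? top_three m with                -- top_three.remove(max(top_three))
        | none => top_three                                      -- unreachable: m ∈ top_three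
        | some t => t ++ [(p.2.1, p.1)]                          -- top_three.append((rank, idx))
      else top_three

def solution (ranks : List Int) (attendances : List Int) : Int :=
  let top_three := (PySem.List.enumerate (List.zip ranks attendances)).foldl pvStepA
      [((101 : Int), (101 : Int)), (101, 101), (101, 101)]
  let top_three := PySem.List.sorted2 top_three Prod.fst Prod.snd        -- top_three.sort()
  -- top_three[0/1/2][1]: indices provably in range (the list keeps length 3), pyGetD's default is never used
  (PySem.List.pyGetD top_three 0 (0, 0)).2 * 10000 + (PySem.List.pyGetD top_three 1 (0, 0)).2 * 100
    + (PySem.List.pyGetD top_three 2 (0, 0)).2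

-- ===== PORT B =====
def solution_alt (ranks : List Int) (attendances : List Int) : Int :=
  let cands := ((PySem.List.enumerate (List.zip ranks attendances)).filter
      (fun p => p.2.2 != 0 && decide (p.2.1 < 101))).map (fun p => (p.2.1, p.1))
  let top := PySem.List.slice
      (PySem.List.sorted2 cands Prod.fst Prod.snd ++ [((101 : Int), (101 : Int)), (101, 101), (101, 101)])
      none (some 3)
  -- top[0/1/2][1]: indices provably in range (the padded list has ≥ 3 elements), pyGetD's default is never used
  (PySem.List.pyGetD top 0 (0, 0)).2 * 10000 + (PySem.List.pyGetD top 1 (0, 0)).2 * 100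
    + (PySem.List.pyGetD top 2 (0, 0)).2

-- ===== PRECONDITION & SPEC =====
def Spec_solution (ranks : List Int) (attendances : List Int) (out : Int) : Prop := out = solution_alt ranks attendances
instance (ranks : List Int) (attendances : List Int) (out : Int) : Decidable (Spec_solution ranks attendances out) := by unfold Spec_solution; infer_instance

-- ===== CLAIM (what is proved, stated in full; the proofs are below) =====
def Claim_equal_solution : Prop := ∀ (ranks : List Int) (attendances : List Int), Dom_solution ranks attendances → Spec_solution ranks attendances (solution ranks attendances)

-- ===== LEMMAS AND PROOFS =====

-- Python's lexicographic ≤ on pairs, and the strict 'before' test used by sorted2/max2?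
def ple (p q : Int × Int) : Prop := p.1 < q.1 ∨ (p.1 = q.1 ∧ p.2 ≤ q.2)
def bef (p q : Int × Int) : Bool := decide (p.1 < q.1) || (!decide (q.1 < p.1) && decide (p.2 < q.2))
def pleb (p q : Int × Int) : Bool := decide (p.1 < q.1 ∨ (p.1 = q.1 ∧ p.2 ≤ q.2))
def psort (xs : List (Int × Int)) : List (Int × Int) := PySem.List.sorted2 xs Prod.fst Prod.snd

theorem pleb_iff (p q : Int × Int) : pleb p q = true ↔ ple p q := by
  simp [pleb, ple]

theorem bef_true_iff (p q : Int × Int) : bef p q = true ↔ (p.1 < q.1 ∨ (p.1 = q.1 ∧ p.2 < q.2)) := by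
  simp [bef]; omega

theorem bef_false_iff (p q : Int × Int) : bef q p = false ↔ ple p q := by
  simp [bef, ple]; omega

theorem ple_refl (p : Int × Int) : ple p p := by simp [ple]

theorem ple_trans {p q r : Int × Int} (h1 : ple p q) (h2 : ple q r) : ple p r := by
  simp only [ple] at *; omega

theorem ple_antisymm {p q : Int × Int} (h1 : ple p q) (h2 : ple q p) : p = q := by
  simp only [ple] at *
  have : p.1 = q.1 ∧ p.2 = q.2 := by omega
  exact Prod.ext this.1 this.2

theorem ple_total (p q : Int × Int) : ple p q ∨ ple q p := by simp only [ple]; omega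

theorem bef_imp_ple {p q : Int × Int} (h : bef p q = true) : ple p q := by
  rw [bef_true_iff] at h; simp only [ple]; omega

theorem psort_eq_foldl (xs : List (Int × Int)) :
    psort xs = List.foldl (fun acc x => PySem.List.insertBy bef x acc) [] xs := rfl

theorem insertBy_pairwise {x : Int × Int} {acc : List (Int × Int)}
    (h : acc.Pairwise ple) : (PySem.List.insertBy bef x acc).Pairwise ple := by
  induction acc with
  | nil => simp [PySem.List.insertBy]
  | cons y ys ih =>
    rw [List.pairwise_cons] at h
    by_cases hb : bef x y = true
    · have hxy : ple x y := bef_imp_ple hb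
      simp only [PySem.List.insertBy, hb, if_true]
      rw [List.pairwise_cons]
      constructor
      · intro z hz
        rcases List.mem_cons.mp hz with rfl | hz
        · exact hxy
        · exact ple_trans hxy (h.1 z hz)
      · exact List.pairwise_cons.mpr h
    · rw [Bool.not_eq_true] at hb
      have hyx : ple y x := (bef_false_iff y x).mp hb
      simp only [PySem.List.insertBy, hb, Bool.false_eq_true, if_false]
      rw [List.pairwise_cons]
      constructor
      · intro z hz
        rw [PySem.List.mem_insertBy] at hz
        rcases hz with rfl | hz
        · exact hyx
        · exact h.1 z hz
      · exact ih h.2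

theorem foldl_insertBy_pairwise (xs : List (Int × Int)) :
    ∀ acc : List (Int × Int), acc.Pairwise ple →
      (List.foldl (fun acc x => PySem.List.insertBy bef x acc) acc xs).Pairwise ple := by
  induction xs with
  | nil => intro acc h; simpa using h
  | cons x xs ih =>
    intro acc h
    simpa using ih _ (insertBy_pairwise h)

theorem psort_pairwise (xs : List (Int × Int)) : (psort xs).Pairwise ple := by
  rw [psort_eq_foldl]; exact foldl_insertBy_pairwise xs [] (by simp)

theorem psort_perm (xs : List (Int × Int)) : (psort xs).Perm xs :=
  PySem.List.sorted2_perm xs Prod.fst Prod.snd false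

theorem sorted_unique {xs ys : List (Int × Int)} (hp : xs.Perm ys)
    (h1 : xs.Pairwise ple) (h2 : ys.Pairwise ple) : xs = ys := by
  exact List.Perm.eq_of_pairwise (fun a b _ _ h h' => ple_antisymm h h') h1 h2 hp

theorem psort_congr {xs ys : List (Int × Int)} (h : xs.Perm ys) : psort xs = psort ys :=
  sorted_unique ((psort_perm xs).trans (h.trans (psort_perm ys).symm))
    (psort_pairwise xs) (psort_pairwise ys)

-- in a ple-sorted list, everything past the ple-takeWhile prefix is not ple m
theorem sorted_dropWhile_not {l : List (Int × Int)} (hl : l.Pairwise ple) (m : Int × Int) :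
    ∀ y ∈ l.dropWhile (fun z => pleb z m), ¬ ple y m := by
  induction l with
  | nil => simp
  | cons a l ih =>
    rw [List.pairwise_cons] at hl
    rw [List.dropWhile_cons (p := fun z => pleb z m)]
    by_cases h : pleb a m = true
    · rw [if_pos h]; exact ih hl.2
    · rw [if_neg h]
      intro y hy
      rcases List.mem_cons.mp hy with rfl | hy'
      · exact fun hp => h ((pleb_iff _ _).mpr hp)
      · exact fun hp => h ((pleb_iff _ _).mpr (ple_trans (hl.1 y hy') hp))

-- erasing an element that has at least 3 elements ≤ it (after the erase) does not change take-3 of the sort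
theorem take3_psort_erase {M : List (Int × Int)} {m : Int × Int} (hm : m ∈ M)
    (hc : 3 ≤ (M.erase m).countP (fun x => pleb x m)) :
    (psort M).take 3 = (psort (M.erase m)).take 3 := by
  have hsplit : (psort (M.erase m)).takeWhile (fun x => pleb x m)
      ++ (psort (M.erase m)).dropWhile (fun x => pleb x m) = psort (M.erase m) :=
    List.takeWhile_append_dropWhile
  set s' := psort (M.erase m) with hs'
  set u := s'.takeWhile (fun x => pleb x m) with hu
  set v := s'.dropWhile (fun x => pleb x m) with hv
  have hsp : s'.Pairwise ple := psort_pairwise _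
  have hsp' : (u ++ v).Pairwise ple := by rw [hsplit]; exact hsp
  rw [List.pairwise_append] at hsp'
  have hup : ∀ x ∈ u, ple x m := by
    intro x hx
    rw [hu] at hx
    exact (pleb_iff _ _).mp (@List.mem_takeWhile_imp _ (fun z => pleb z m) s' x hx)
  have hvnot : ∀ y ∈ v, ¬ ple y m := by
    intro y hy
    rw [hv] at hy
    exact sorted_dropWhile_not hsp m y hy
  have hcount : u.length = (M.erase m).countP (fun x => pleb x m) := by
    have h1 : (M.erase m).countP (fun x => pleb x m) = s'.countP (fun x => pleb x m) :=
      (List.Perm.countP_eq _ (psort_perm (M.erase m))).symm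
    have h2 : s'.countP (fun x => pleb x m)
        = u.countP (fun x => pleb x m) + v.countP (fun x => pleb x m) := by
      rw [← hsplit]; exact List.countP_append
    have h3 : u.countP (fun x => pleb x m) = u.length :=
      List.countP_eq_length.mpr (fun a ha => (pleb_iff _ _).mpr (hup a ha))
    have h4 : v.countP (fun x => pleb x m) = 0 :=
      List.countP_eq_zero.mpr (fun a ha hb => hvnot a ha ((pleb_iff _ _).mp hb))
    omega
  have hlen : 3 ≤ u.length := by omega
  have hPM : psort M = u ++ m :: v := by
    apply sorted_unique
    · have p1 : (psort M).Perm M := psort_perm M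
      have p2 : M.Perm (m :: M.erase m) := List.perm_cons_erase hm
      have p3 : (m :: M.erase m).Perm (m :: s') := ((psort_perm _).symm).cons m
      have p4 : (m :: s').Perm (u ++ m :: v) := by
        rw [← hsplit]; exact List.perm_middle.symm
      exact ((p1.trans p2).trans p3).trans p4
    · exact psort_pairwise M
    · rw [List.pairwise_append]
      refine ⟨hsp'.1, ?_, ?_⟩
      · rw [List.pairwise_cons]
        refine ⟨fun y hy => ?_, hsp'.2.1⟩
        rcases ple_total m y with h | h
        · exact h
        · exact absurd h (hvnot y hy)
      · intro a ha b hb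
        rcases List.mem_cons.mp hb with rfl | hb'
        · exact hup a ha
        · exact hsp'.2.2 a ha b hb'
  rw [hPM, List.take_append_of_le_length hlen, ← hsplit,
    List.take_append_of_le_length hlen]

-- the foldl inside max2? (with both keys the pair projections) is a running lexicographic max
def gmax (acc : Option (Int × Int)) (x : Int × Int) : Option (Int × Int) :=
  match acc with
  | none => some x
  | some mm =>
    if (decide (mm.1 < x.1) || !decide (x.1 < mm.1) && decide (mm.2 < x.2)) = true then some x
    else some mm

theorem max2_eq (xs : List (Int × Int)) :
    PySem.List.max2? xs Prod.fst Prod.snd = List.foldl gmax none xs := by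
  unfold PySem.List.max2?
  congr 1
  funext acc x
  cases acc <;> rfl

theorem gmax_some (m x : Int × Int) : gmax (some m) x = if bef m x then some x else some m := rfl

theorem gmax_none (x : Int × Int) : gmax none x = some x := rfl

theorem gmax_foldl (l : List (Int × Int)) : ∀ m : Int × Int,
    ∃ m', List.foldl gmax (some m) l = some m' ∧ (m' = m ∨ m' ∈ l) ∧ ple m m' ∧ ∀ p ∈ l, ple p m' := by
  induction l with
  | nil => intro m; exact ⟨m, rfl, Or.inl rfl, ple_refl m, by simp⟩
  | cons x l ih =>
    intro m
    by_cases hb : bef m x = true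
    · obtain ⟨m', h1, h2, h3, h4⟩ := ih x
      refine ⟨m', ?_, ?_, ple_trans (bef_imp_ple hb) h3, ?_⟩
      · rw [List.foldl_cons, gmax_some, if_pos hb]; exact h1
      · rcases h2 with rfl | h2
        · exact Or.inr (List.mem_cons_self)
        · exact Or.inr (List.mem_cons_of_mem x h2)
      · intro p hp
        rcases List.mem_cons.mp hp with rfl | hp'
        · exact h3
        · exact h4 p hp'
    · rw [Bool.not_eq_true] at hb
      have hxm : ple x m := (bef_false_iff x m).mp hb
      obtain ⟨m', h1, h2, h3, h4⟩ := ih m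
      refine ⟨m', ?_, ?_, h3, ?_⟩
      · rw [List.foldl_cons, gmax_some, if_neg (by rw [hb]; simp)]; exact h1
      · rcases h2 with rfl | h2
        · exact Or.inl rfl
        · exact Or.inr (List.mem_cons_of_mem x h2)
      · intro p hp
        rcases List.mem_cons.mp hp with rfl | hp'
        · exact ple_trans hxm h3
        · exact h4 p hp'

theorem max2_spec (t : List (Int × Int)) (h : t ≠ []) :
    ∃ m, PySem.List.max2? t Prod.fst Prod.snd = some m ∧ m ∈ t ∧ ∀ p ∈ t, ple p m := by
  cases t with
  | nil => exact absurd rfl h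
  | cons a l =>
    obtain ⟨m', h1, h2, h3, h4⟩ := gmax_foldl l a
    refine ⟨m', ?_, ?_, ?_⟩
    · rw [max2_eq, List.foldl_cons, gmax_none]; exact h1
    · rcases h2 with rfl | h2
      · exact List.mem_cons_self
      · exact List.mem_cons_of_mem a h2
    · intro p hp
      rcases List.mem_cons.mp hp with rfl | hp'
      · exact h3
      · exact h4 p hp'

-- the candidate list of B, relative to a start index
def candsOf (zs : List (Int × Int)) (n : Int) : List (Int × Int) :=
  ((PySem.List.enumerate zs n).filter (fun p => p.2.2 != 0 && decide (p.2.1 < 101))).map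
    (fun p => (p.2.1, p.1))

theorem candsOf_cons (z : Int × Int) (zs : List (Int × Int)) (n : Int) :
    candsOf (z :: zs) n
      = (if z.2 ≠ 0 ∧ z.1 < 101 then [(z.1, n)] else []) ++ candsOf zs (n + 1) := by
  have he : PySem.List.enumerate (z :: zs) n = (n, z) :: PySem.List.enumerate zs (n + 1) := by
    simp [PySem.List.enumerate]
  rw [candsOf, candsOf, he, List.filter_cons]
  by_cases h1 : z.2 = 0
  · simp [h1]
  · by_cases h2 : z.1 < 101
    · simp [h1, h2]
    · simp [h1, h2]

theorem candsOf_mem : ∀ (zs : List (Int × Int)) (n : Int) (q : Int × Int),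
    q ∈ candsOf zs n → n ≤ q.2 ∧ q.1 < 101 := by
  intro zs
  induction zs with
  | nil => intro n q hq; simp [candsOf, PySem.List.enumerate] at hq
  | cons z zs ih =>
    intro n q hq
    rw [candsOf_cons] at hq
    rcases List.mem_append.mp hq with hq1 | hq2
    · split_ifs at hq1 with h
      · simp at hq1
        rcases hq1 with rfl
        exact ⟨le_refl _, h.2⟩
      · simp at hq1
    · have := ih (n + 1) q hq2
      exact ⟨by omega, this.2⟩

theorem inv_bump {t : List (Int × Int)} {n : Int}
    (h : ∀ p ∈ t, ple p (101, 101) ∧ (p.2 < n ∨ p = (101, 101))) :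
    ∀ p ∈ t, ple p (101, 101) ∧ (p.2 < n + 1 ∨ p = (101, 101)) := by
  intro p hp
  refine ⟨(h p hp).1, ?_⟩
  rcases (h p hp).2 with h' | h'
  · exact Or.inl (by omega)
  · exact Or.inr h'

-- the loop invariant: A's running top_three, sorted, is the 3 smallest of candidates-so-far plus sentinels
theorem main_loop : ∀ (zs : List (Int × Int)) (n : Int) (t : List (Int × Int)),
    t.length = 3 →
    (∀ p ∈ t, ple p (101, 101) ∧ (p.2 < n ∨ p = (101, 101))) →
    psort (List.foldl pvStepA t (PySem.List.enumerate zs n))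
      = (psort (candsOf zs n ++ t)).take 3 := by
  intro zs
  induction zs with
  | nil =>
    intro n t hlen _
    have hc : candsOf [] n = [] := rfl
    have he : PySem.List.enumerate ([] : List (Int × Int)) n = [] := rfl
    rw [he, hc, List.foldl_nil, List.nil_append]
    rw [List.take_of_length_le (by rw [(psort_perm t).length_eq, hlen])]
  | cons z zs ih =>
    intro n t hlen hinv
    have he : PySem.List.enumerate (z :: zs) n = (n, z) :: PySem.List.enumerate zs (n + 1) := by
      simp [PySem.List.enumerate]
    rw [he, List.foldl_cons]
    by_cases ha : z.2 = 0
    · have hstep : pvStepA t (n, z) = t := by simp [pvStepA, ha]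
      rw [hstep, ih (n + 1) t hlen (inv_bump hinv), candsOf_cons,
        if_neg (by simp [ha]), List.nil_append]
    · have htne : t ≠ [] := by intro h; rw [h] at hlen; simp at hlen
      obtain ⟨m, hmax, hmem, hmaxall⟩ := max2_spec t htne
      have hm101 : m.1 ≤ 101 := by
        have := (hinv m hmem).1
        rcases this with h | h
        · omega
        · omega
      by_cases hr : z.1 < m.1
      · -- A inserts (z.1, n) and drops the current maximum m
        have hrem : PySem.List.remove? t m = some (t.erase m) :=
          PySem.List.remove?_eq_some_erase t m hmem
        have hstep : pvStepA t (n, z) = t.erase m ++ [(z.1, n)] := by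
          simp [pvStepA, ha, hmax, hrem, hr]
        have hlen2 : (t.erase m ++ [(z.1, n)]).length = 3 := by
          simp [List.length_erase_of_mem hmem, hlen]
        have hinv2 : ∀ p ∈ t.erase m ++ [(z.1, n)],
            ple p (101, 101) ∧ (p.2 < n + 1 ∨ p = (101, 101)) := by
          intro p hp
          rcases List.mem_append.mp hp with hp1 | hp2
          · exact inv_bump hinv p (List.erase_subset hp1)
          · simp at hp2
            rcases hp2 with rfl
            exact ⟨Or.inl (by omega), Or.inl (by omega)⟩
        rw [hstep, ih (n + 1) _ hlen2 hinv2, candsOf_cons, if_pos ⟨ha, by omega⟩]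
        have hmM : m ∈ (z.1, n) :: (candsOf zs (n + 1) ++ t) :=
          List.mem_cons_of_mem _ (List.mem_append.mpr (Or.inr hmem))
        have hmne : m ≠ (z.1, n) := by
          intro h; rw [h] at hr; simp at hr
        have hmnotc : m ∉ candsOf zs (n + 1) := by
          intro h
          have h1 := candsOf_mem zs (n + 1) m h
          rcases (hinv m hmem).2 with h2 | h2
          · omega
          · rw [h2] at h1; simp at h1
        have herase : ((z.1, n) :: (candsOf zs (n + 1) ++ t)).erase m
            = (z.1, n) :: (candsOf zs (n + 1) ++ t.erase m) := by
          rw [List.erase_cons_tail (by simp [hmne.symm]), List.erase_append_right _ hmnotc]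
        have hcount : 3 ≤ (((z.1, n) :: (candsOf zs (n + 1) ++ t)).erase m).countP
            (fun x => pleb x m) := by
          rw [herase, List.countP_cons_of_pos (by
            rw [pleb_iff]; exact Or.inl hr), List.countP_append]
          have h2 : (t.erase m).countP (fun x => pleb x m) = (t.erase m).length :=
            List.countP_eq_length.mpr
              (fun p hp => (pleb_iff _ _).mpr (hmaxall p (List.erase_subset hp)))
          rw [h2, List.length_erase_of_mem hmem, hlen]
          omega
        have hEM := take3_psort_erase hmM hcount
        have hperm : (candsOf zs (n + 1) ++ (t.erase m ++ [(z.1, n)])).Perm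
            (((z.1, n) :: (candsOf zs (n + 1) ++ t)).erase m) := by
          rw [herase, ← List.append_assoc]
          exact List.perm_append_singleton _ _
        rw [psort_congr hperm, hEM.symm, List.singleton_append, List.cons_append]
      · -- A keeps top_three unchanged
        have hstep : pvStepA t (n, z) = t := by simp [pvStepA, ha, hmax, hr]
        rw [hstep, ih (n + 1) t hlen (inv_bump hinv), candsOf_cons]
        by_cases hz : z.1 < 101
        · rw [if_pos ⟨ha, hz⟩]
          have hplet : ∀ p ∈ t, ple p (z.1, n) := by
            intro p hp
            have hpm := hmaxall p hp
            rcases (hinv p hp).2 with h2 | h2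
            · rcases hpm with h3 | h3
              · exact Or.inl (by omega)
              · rcases Int.lt_or_le p.1 z.1 with h4 | h4
                · exact Or.inl h4
                · exact Or.inr ⟨by omega, by omega⟩
            · exfalso
              rcases hmaxall p hp with h3 | h3 <;> rw [h2] at h3 <;> simp at h3 <;> omega
          have hcount : 3 ≤ (((z.1, n) :: (candsOf zs (n + 1) ++ t)).erase (z.1, n)).countP
              (fun x => pleb x (z.1, n)) := by
            rw [List.erase_cons_head, List.countP_append]
            have h2 : t.countP (fun x => pleb x (z.1, n)) = t.length :=
              List.countP_eq_length.mpr (fun p hp => (pleb_iff _ _).mpr (hplet p hp))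
            rw [h2, hlen]
            omega
          have hEM := take3_psort_erase (List.mem_cons_self) hcount
          rw [List.erase_cons_head] at hEM
          rw [hEM.symm, List.singleton_append, List.cons_append]
        · rw [if_neg (by tauto), List.nil_append]

theorem psort_def (xs : List (Int × Int)) :
    PySem.List.sorted2 xs Prod.fst Prod.snd = psort xs := rfl

theorem slice3_take (xs : List (Int × Int)) :
    PySem.List.slice xs none (some 3) = xs.take 3 := by
  simpa using PySem.List.slice_to_natCast xs 3

-- ===== VERDICT (by name: the statement is the Claim_ definition above) =====
theorem solution_spec : Claim_equal_solution := by
  intro ranks attendances _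
  unfold Spec_solution
  simp only [solution, solution_alt]
  rw [show ((PySem.List.enumerate (List.zip ranks attendances)).filter
        (fun p => p.2.2 != 0 && decide (p.2.1 < 101))).map (fun p => (p.2.1, p.1))
      = candsOf (List.zip ranks attendances) 0 from rfl]
  rw [psort_def, psort_def, slice3_take]
  have hinv0 : ∀ p ∈ ([((101 : Int), (101 : Int)), (101, 101), (101, 101)] : List (Int × Int)),
      ple p (101, 101) ∧ (p.2 < 0 ∨ p = (101, 101)) := by
    intro p hp
    simp at hp
    rw [hp]
    exact ⟨Or.inr ⟨rfl, le_refl _⟩, Or.inr rfl⟩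
  have hml := main_loop (List.zip ranks attendances) 0
      [((101 : Int), (101 : Int)), (101, 101), (101, 101)] rfl hinv0
  rw [hml]
  have hpad : psort (candsOf (List.zip ranks attendances) 0
        ++ [((101 : Int), (101 : Int)), (101, 101), (101, 101)])
      = psort (candsOf (List.zip ranks attendances) 0)
        ++ [((101 : Int), (101 : Int)), (101, 101), (101, 101)] := by
    apply sorted_unique
    · exact (psort_perm _).trans (((psort_perm _).symm).append_right _)
    · exact psort_pairwise _
    · rw [List.pairwise_append]
      refine ⟨psort_pairwise _, by simp [List.pairwise_cons, ple], ?_⟩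
      intro a ha b hb
      have hamem : a ∈ candsOf (List.zip ranks attendances) 0 := (psort_perm _).subset ha
      have ha1 := candsOf_mem _ 0 a hamem
      have hb' : b = ((101 : Int), (101 : Int)) := by
        simp at hb
        exact hb
      rw [hb']
      exact Or.inl (by omega)
  rw [hpad]
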